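-- pv_equiv track=rewrite | github.com/MarioKartCentral/MarioKartCentral | src/backend/common/data/commands/time_trials/time_trials.py | calculate_validation_status
-- ===== SOURCE A (Python) =====
-- from typing import List, Optional, Dict, Any, Tuple
--
-- def calculate_validation_status(proofs_data: List[Dict[str, Any]], is_invalid: bool = False) -> str:
--     """
--     Calculate the validation status for a time trial record based on the new logic:
--     - valid: there exists a proof with status "valid"
--     - invalid: is_invalid is true OR has proofs but all are marked "invalid"
--     - unvalidated: there exists a proof with status "unvalidated", but no proof with status "valid"
--     - proofless: there are no proofs at all
--     """
--     # 1. If record is marked invalid, always return "invalid"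
--     if is_invalid:
--         return "invalid"
--
--     # 2. If no proofs at all, return "proofless"
--     if not proofs_data:
--         return "proofless"
--
--     # 3. If any proof has status "valid", return "valid"
--     for proof in proofs_data:
--         proof_status = proof.get("status", "unvalidated")
--         if proof_status == "valid":
--             return "valid"
--
--     # 4. If any proof has status "unvalidated" (and no valid proofs), return "unvalidated"
--     for proof in proofs_data:
--         proof_status = proof.get("status", "unvalidated")
--         if proof_status == "unvalidated":
--             return "unvalidated"
--
--     # 5. If we have proofs but all are "invalid", return "invalid" (not proofless)
--     return "invalid"
-- ===== SOURCE B (Python) =====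
-- _RANK = {"valid": 2, "unvalidated": 1}
-- _TABLE = ("proofless", "invalid", "unvalidated", "valid")
--
-- def calculate_validation_status(proofs_data, is_invalid=False):
--     if is_invalid:
--         return "invalid"
--     rank = -1
--     for p in proofs_data:
--         r = _RANK.get(p.get("status", "unvalidated"), 0)
--         if r > rank:
--             rank = r
--     return _TABLE[rank + 1]
-- ===== Notes on version B (the rewrite author's own statement) =====
-- stated objective: alternative
-- what changed: A does two early-returning scans over the proofs plus an explicit empty-list guard; B makes one pass folding each status into a numeric priority (valid=2, unvalidated=1, other=0), keeps the running maximum starting at -1 so the empty case needs no guard, and reads the answer from a table indexed by rank+1.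
import Mathlib
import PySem

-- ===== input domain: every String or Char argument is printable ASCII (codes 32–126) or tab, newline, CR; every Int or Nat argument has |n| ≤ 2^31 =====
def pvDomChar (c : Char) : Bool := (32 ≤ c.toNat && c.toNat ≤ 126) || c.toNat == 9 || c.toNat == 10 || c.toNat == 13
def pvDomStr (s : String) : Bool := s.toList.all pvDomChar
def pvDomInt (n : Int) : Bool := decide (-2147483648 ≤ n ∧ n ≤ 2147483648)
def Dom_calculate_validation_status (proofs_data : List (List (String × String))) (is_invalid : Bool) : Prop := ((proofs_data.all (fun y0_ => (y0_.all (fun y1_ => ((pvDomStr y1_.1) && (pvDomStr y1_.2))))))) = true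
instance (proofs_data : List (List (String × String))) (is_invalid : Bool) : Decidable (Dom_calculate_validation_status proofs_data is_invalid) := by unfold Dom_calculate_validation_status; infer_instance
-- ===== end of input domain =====

-- B replaces A's two early-returning scans (plus an empty-list guard) by one max-of-priorities
-- fold starting at -1 and a table lookup at rank+1 (objective: alternative formulation).

-- ===== PORT A =====
-- loop 3: first scan, early-returns "valid" on a proof with status "valid"
def pvALoop1 : List (List (String × String)) → Option String
  | [] => none
  | p :: rest =>
      if PySem.Dict.getD (PySem.Dict.mk p) "status" "unvalidated" = "valid" then some "valid"
      else pvALoop1 rest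

-- loop 4: second scan, early-returns "unvalidated"
def pvALoop2 : List (List (String × String)) → Option String
  | [] => none
  | p :: rest =>
      if PySem.Dict.getD (PySem.Dict.mk p) "status" "unvalidated" = "unvalidated" then some "unvalidated"
      else pvALoop2 rest

def calculate_validation_status (proofs_data : List (List (String × String))) (is_invalid : Bool) : String :=
  if is_invalid then "invalid"
  else if proofs_data.isEmpty then "proofless"
  else match pvALoop1 proofs_data with
    | some s => s
    | none =>
      match pvALoop2 proofs_data with
      | some s => s
      | none => "invalid"

-- ===== PORT B =====
-- _RANK.get(status, 0) of Source B
def pvRankGet (s : String) : Int :=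
  PySem.Dict.getD (PySem.Dict.mk [("valid", (2 : Int)), ("unvalidated", 1)]) s 0

def calculate_validation_status_alt (proofs_data : List (List (String × String))) (is_invalid : Bool) : String :=
  if is_invalid then "invalid"
  else
    let rank : Int := proofs_data.foldl (fun acc p =>
      let r := pvRankGet (PySem.Dict.getD (PySem.Dict.mk p) "status" "unvalidated")
      if r > acc then r else acc) (-1)
    -- _TABLE[rank + 1]; rank ∈ [-1, 2] so the index is always in range
    match PySem.List.pyGet? ["proofless", "invalid", "unvalidated", "valid"] (rank + 1) with
    | some s => s
    | none => ""

-- ===== PRECONDITION & SPEC =====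
def Spec_calculate_validation_status (proofs_data : List (List (String × String))) (is_invalid : Bool) (out : String) : Prop := out = calculate_validation_status_alt proofs_data is_invalid
instance (proofs_data : List (List (String × String))) (is_invalid : Bool) (out : String) : Decidable (Spec_calculate_validation_status proofs_data is_invalid out) := by unfold Spec_calculate_validation_status; infer_instance

-- ===== CLAIM (what is proved, stated in full; the proofs are below) =====
def Claim_equal_calculate_validation_status : Prop := ∀ (proofs_data : List (List (String × String))) (is_invalid : Bool), Dom_calculate_validation_status proofs_data is_invalid → Spec_calculate_validation_status proofs_data is_invalid (calculate_validation_status proofs_data is_invalid)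

-- ===== LEMMAS AND PROOFS =====

-- the status of one proof dict, as both ports compute it
def pvSt (p : List (String × String)) : String :=
  PySem.Dict.getD (PySem.Dict.mk p) "status" "unvalidated"

-- foldr max over the ranks of a status list
def pvF (ss : List String) : Int := (ss.map pvRankGet).foldr max (-1)

theorem pvRankGet_eq (s : String) :
    pvRankGet s = if s = "valid" then 2 else if s = "unvalidated" then 1 else 0 := by
  by_cases h1 : s = "valid"
  · simp [pvRankGet, h1, PySem.Dict.getD, PySem.Dict.get?, PySem.Dict.mk]
  · by_cases h2 : s = "unvalidated"
    · simp [pvRankGet, h1, h2, PySem.Dict.getD, PySem.Dict.get?, PySem.Dict.mk]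
    · have e1 : ("valid" == s) = false := by simp; exact fun hh => h1 hh.symm
      have e2 : ("unvalidated" == s) = false := by simp; exact fun hh => h2 hh.symm
      simp [pvRankGet, h1, h2, PySem.Dict.getD, PySem.Dict.get?, PySem.Dict.mk, List.find?, e1, e2]

theorem pvF_bounds (ss : List String) : -1 ≤ pvF ss ∧ pvF ss ≤ 2 := by
  induction ss with
  | nil => simp [pvF]
  | cons s ss ih =>
    simp only [pvF, List.map_cons, List.foldr_cons] at ih ⊢
    rw [pvRankGet_eq]
    split_ifs <;> omega

theorem pvFoldl_eq_pvF (ss : List String) (a : Int) (ha : -1 ≤ a) :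
    ss.foldl (fun acc s => let r := pvRankGet s; if r > acc then r else acc) a
      = max a (pvF ss) := by
  induction ss generalizing a with
  | nil => simp [pvF]; omega
  | cons s ss ih =>
    simp only [List.foldl_cons, pvF, List.map_cons, List.foldr_cons]
    have hb : -1 ≤ pvRankGet s := by rw [pvRankGet_eq]; split_ifs <;> omega
    have h1 : (if pvRankGet s > a then pvRankGet s else a) = max a (pvRankGet s) := by
      omega
    rw [h1, ih _ (le_trans ha (le_max_left _ _)), max_assoc]
    rfl

theorem pvF_valid (ss : List String) : "valid" ∈ ss → pvF ss = 2 := by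
  induction ss with
  | nil => intro h; simp at h
  | cons s ss ih =>
    intro h
    simp only [pvF, List.map_cons, List.foldr_cons]
    have hbd := pvF_bounds ss
    simp only [pvF] at hbd
    rcases List.mem_cons.mp h with h | h
    · rw [← h, pvRankGet_eq]; simp; omega
    · have := ih h
      simp only [pvF] at this
      rw [this, pvRankGet_eq]
      split_ifs <;> omega

theorem pvF_zero (ss : List String) : ss ≠ [] → "valid" ∉ ss → "unvalidated" ∉ ss → pvF ss = 0 := by
  induction ss with
  | nil => intro h; exact absurd rfl h
  | cons s ss ih =>
    intro _ hv hu
    have h1 : s ≠ "valid" := fun hh => hv (by simp [hh])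
    have h2 : s ≠ "unvalidated" := fun hh => hu (by simp [hh])
    have h3 : "valid" ∉ ss := fun hh => hv (by simp [hh])
    have h4 : "unvalidated" ∉ ss := fun hh => hu (by simp [hh])
    simp only [pvF, List.map_cons, List.foldr_cons]
    rw [pvRankGet_eq]
    simp [h1, h2]
    by_cases he : ss = []
    · simp [he, pvF]
    · have := ih he h3 h4
      simp only [pvF] at this
      omega

theorem pvF_unval (ss : List String) : "valid" ∉ ss → "unvalidated" ∈ ss → pvF ss = 1 := by
  induction ss with
  | nil => intro _ h; simp at h
  | cons s ss ih =>
    intro hv h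
    have hv1 : s ≠ "valid" := fun hh => hv (by simp [hh])
    have hv2 : "valid" ∉ ss := fun hh => hv (by simp [hh])
    simp only [pvF, List.map_cons, List.foldr_cons]
    have hle : pvF ss ≤ 1 := by
      by_cases hu : "unvalidated" ∈ ss
      · exact le_of_eq (ih hv2 hu)
      · by_cases he : ss = []
        · simp [he, pvF]
        · rw [pvF_zero ss he hv2 hu]; omega
    have hge := (pvF_bounds ss).1
    simp only [pvF] at hle hge
    rcases List.mem_cons.mp h with h | h
    · rw [← h, pvRankGet_eq]; simp; omega
    · have := ih hv2 h
      simp only [pvF] at this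
      rw [this, pvRankGet_eq]
      simp [hv1]
      split_ifs <;> omega

theorem pvALoop1_eq (xs : List (List (String × String))) :
    pvALoop1 xs = if "valid" ∈ xs.map pvSt then some "valid" else none := by
  induction xs with
  | nil => simp [pvALoop1]
  | cons p rest ih =>
    simp only [pvALoop1, List.map_cons, List.mem_cons]
    by_cases h : pvSt p = "valid"
    · simp [pvSt] at h; simp [h, pvSt]
    · have h' : ¬ ("valid" = pvSt p) := fun hh => h hh.symm
      simp only [pvSt] at h
      simp [h, h', ih]

theorem pvALoop2_eq (xs : List (List (String × String))) :
    pvALoop2 xs = if "unvalidated" ∈ xs.map pvSt then some "unvalidated" else none := by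
  induction xs with
  | nil => simp [pvALoop2]
  | cons p rest ih =>
    simp only [pvALoop2, List.map_cons, List.mem_cons]
    by_cases h : pvSt p = "unvalidated"
    · simp [pvSt] at h; simp [h, pvSt]
    · have h' : ¬ ("unvalidated" = pvSt p) := fun hh => h hh.symm
      simp only [pvSt] at h
      simp [h, h', ih]

-- the fold in B's port, rewritten through statuses
theorem pvBfold_eq (pd : List (List (String × String))) :
    pd.foldl (fun acc p =>
        let r := pvRankGet (PySem.Dict.getD (PySem.Dict.mk p) "status" "unvalidated")
        if r > acc then r else acc) (-1)
      = pvF (pd.map pvSt) := by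
  have : pd.foldl (fun acc p =>
        let r := pvRankGet (PySem.Dict.getD (PySem.Dict.mk p) "status" "unvalidated")
        if r > acc then r else acc) (-1)
      = (pd.map pvSt).foldl (fun acc s => let r := pvRankGet s; if r > acc then r else acc) (-1) := by
    rw [List.foldl_map]
    rfl
  rw [this, pvFoldl_eq_pvF _ _ (le_refl _)]
  have := (pvF_bounds (pd.map pvSt)).1
  omega

-- ===== VERDICT (by name: the statement is the Claim_ definition above) =====
theorem calculate_validation_status_spec : Claim_equal_calculate_validation_status := by
  intro pd inv _
  unfold Spec_calculate_validation_status calculate_validation_status calculate_validation_status_alt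
  cases inv with
  | true => rfl
  | false =>
    simp only [Bool.false_eq_true, if_false, pvALoop1_eq, pvALoop2_eq, pvBfold_eq]
    by_cases he : pd = []
    · subst he; rfl
    · have hne : pd.isEmpty = false := by simp [he]
      have hne' : pd.map pvSt ≠ [] := by simp [he]
      simp only [hne, Bool.false_eq_true, if_false]
      by_cases h1 : "valid" ∈ pd.map pvSt
      · rw [pvF_valid _ h1]
        simp [h1, PySem.List.pyGet?, PySem.List.pyIdx?]
      · by_cases h2 : "unvalidated" ∈ pd.map pvSt
        · rw [pvF_unval _ h1 h2]
          simp [h1, h2, PySem.List.pyGet?, PySem.List.pyIdx?]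
        · rw [pvF_zero _ hne' h1 h2]
          simp [h1, h2, PySem.List.pyGet?, PySem.List.pyIdx?]
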